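-- pv_equiv track=rewrite | github.com/loveandroiduk/MK | plugin.video.footballhighlightssubreddit/resources/lib/youtube.py | _check_if_quality
-- ===== SOURCE A (Python) =====
-- def _check_if_quality(itag_dict, url_dict):
-- 	if list(itag_dict):
-- 		max_qual = max(list(itag_dict))
-- 		for itag in itag_dict[max_qual]:
-- 			if itag in url_dict:
-- 				return url_dict[itag]
-- 		else:
-- 			max_qual = max(list(itag_dict))
-- 			del itag_dict[max_qual]
-- 			return _check_if_quality(itag_dict, url_dict)
-- 	else:
-- 		return None
-- ===== SOURCE B (Python) =====
-- # Non-destructive rewrite: iterate the quality keys in descending sorted order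
-- # instead of recursively deleting the max key (return value only: unlike A,
-- # this does not mutate itag_dict).
-- def _check_if_quality(itag_dict, url_dict):
--     for qual in sorted(itag_dict, reverse=True):
--         for itag in itag_dict[qual]:
--             if itag in url_dict:
--                 return url_dict[itag]
--     return None
-- ===== Notes on version B (the rewrite author's own statement) =====
-- stated objective: simpler
-- what changed: Replaces the recursive delete-the-max-key-and-retry scheme (max recomputed over all remaining keys at every level) with a single non-destructive pass over the quality keys sorted once in descending order; return value identical, but B does not mutate itag_dict while A deletes exhausted keys in place.
import Mathlib
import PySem

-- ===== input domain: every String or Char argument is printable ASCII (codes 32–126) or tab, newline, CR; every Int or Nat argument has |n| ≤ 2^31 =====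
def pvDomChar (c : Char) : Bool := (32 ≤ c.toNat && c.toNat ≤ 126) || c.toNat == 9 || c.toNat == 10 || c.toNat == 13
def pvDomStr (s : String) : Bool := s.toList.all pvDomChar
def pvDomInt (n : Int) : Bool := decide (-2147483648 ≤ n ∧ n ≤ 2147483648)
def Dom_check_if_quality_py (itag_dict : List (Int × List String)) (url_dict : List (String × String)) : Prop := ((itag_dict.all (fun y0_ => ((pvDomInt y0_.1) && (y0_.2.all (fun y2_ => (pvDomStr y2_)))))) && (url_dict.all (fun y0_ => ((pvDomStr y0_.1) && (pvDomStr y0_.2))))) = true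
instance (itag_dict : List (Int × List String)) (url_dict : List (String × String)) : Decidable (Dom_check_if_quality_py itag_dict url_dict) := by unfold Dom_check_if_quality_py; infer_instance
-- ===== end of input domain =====

-- B replaces A's recursive delete-max-and-retry with one non-destructive scan of the
-- quality keys sorted descending (simpler; equivalence is about the RETURN value:
-- A deletes exhausted keys from itag_dict in place, B does not mutate it).

-- ===== PORT A =====
-- the inner 'for itag in itag_dict[max_qual]: if itag in url_dict: return url_dict[itag]'
def findUrlA (url_dict : List (String × String)) : List String → Option String
  | [] => none
  | itag :: rest =>
    match url_dict.find? (fun p => p.1 == itag) with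
    | some p => some p.2
    | none => findUrlA url_dict rest

-- termination fact for the recursion: deleting the max key shrinks the dict
theorem eraseP_max_lt (itag_dict : List (Int × List String)) (m : Int)
    (h : PySem.List.max? (itag_dict.map (fun p => p.1)) (fun x => x) = some m) :
    (itag_dict.eraseP (fun p => p.1 == m)).length < itag_dict.length := by
  have hm := PySem.List.max?_mem h
  obtain ⟨p, hp, hpm⟩ := List.mem_map.mp hm
  have : (itag_dict.eraseP (fun p => p.1 == m)).length = itag_dict.length - 1 :=
    List.length_eraseP_of_mem hp (by simp [hpm])
  have hlen : 0 < itag_dict.length := List.length_pos_of_mem hp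
  omega

def check_if_quality_py (itag_dict : List (Int × List String)) (url_dict : List (String × String)) : Option String :=
  if itag_dict = [] then none        -- 'else: return None' of 'if list(itag_dict):'
  else
    match h : PySem.List.max? (itag_dict.map (fun p => p.1)) (fun x => x) with
    | none => none                   -- unreachable: max of a nonempty key list
    | some max_qual =>
      match findUrlA url_dict (((itag_dict.find? (fun p => p.1 == max_qual)).map (fun p => p.2)).getD []) with
      | some r => some r
      | none =>                      -- 'del itag_dict[max_qual]; return _check_if_quality(...)'
        check_if_quality_py (itag_dict.eraseP (fun p => p.1 == max_qual)) url_dict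
termination_by itag_dict.length
decreasing_by exact eraseP_max_lt _ _ h

-- ===== PORT B =====
def findUrlB (url_dict : List (String × String)) : List String → Option String
  | [] => none
  | itag :: rest =>
    match url_dict.find? (fun p => p.1 == itag) with
    | some p => some p.2
    | none => findUrlB url_dict rest

-- 'for qual in sorted(itag_dict, reverse=True): …'
def scanQualsB (itag_dict : List (Int × List String)) (url_dict : List (String × String)) : List Int → Option String
  | [] => none
  | qual :: rest =>
    match findUrlB url_dict (((itag_dict.find? (fun p => p.1 == qual)).map (fun p => p.2)).getD []) with
    | some r => some r
    | none => scanQualsB itag_dict url_dict rest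

def check_if_quality_py_alt (itag_dict : List (Int × List String)) (url_dict : List (String × String)) : Option String :=
  scanQualsB itag_dict url_dict
    (PySem.List.sorted (itag_dict.map (fun p => p.1)) (fun x => x) true)

-- ===== PRECONDITION & SPEC =====
-- Pre_ excludes association lists with duplicate keys: they are an ambiguous encoding of a
-- Python dict (dict construction collapses duplicates last-wins), so the ports' first-match
-- lookup convention is arbitrary there.
def Pre_check_if_quality_py (itag_dict : List (Int × List String)) (url_dict : List (String × String)) : Prop :=
  (itag_dict.map (fun p => p.1)).Nodup ∧ (url_dict.map (fun p => p.1)).Nodup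
instance (itag_dict : List (Int × List String)) (url_dict : List (String × String)) : Decidable (Pre_check_if_quality_py itag_dict url_dict) := by unfold Pre_check_if_quality_py; infer_instance

def pvWitness_check_if_quality_py : (List (Int × List String)) × (List (String × String)) :=
  ([(22, ["a", "b"]), (18, ["c"])], [("c", "http://x")])

def Spec_check_if_quality_py (itag_dict : List (Int × List String)) (url_dict : List (String × String)) (out : Option String) : Prop := out = check_if_quality_py_alt itag_dict url_dict
instance (itag_dict : List (Int × List String)) (url_dict : List (String × String)) (out : Option String) : Decidable (Spec_check_if_quality_py itag_dict url_dict out) := by unfold Spec_check_if_quality_py; infer_instance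

-- ===== CLAIM (what is proved, stated in full; the proofs are below) =====
def Claim_equal_check_if_quality_py : Prop := ∀ (itag_dict : List (Int × List String)) (url_dict : List (String × String)), Dom_check_if_quality_py itag_dict url_dict → Pre_check_if_quality_py itag_dict url_dict → Spec_check_if_quality_py itag_dict url_dict (check_if_quality_py itag_dict url_dict)

-- ===== LEMMAS AND PROOFS =====

theorem findUrl_eq (u : List (String × String)) (l : List String) : findUrlA u l = findUrlB u l := by
  induction l with
  | nil => rfl
  | cons x t ih => simp [findUrlA, findUrlB, ih]

-- looking up a key ≠ m is unchanged by deleting key m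
theorem find?_eraseP_ne (d : List (Int × List String)) (m q : Int) (hq : q ≠ m) :
    (d.eraseP (fun p => p.1 == m)).find? (fun p => p.1 == q) = d.find? (fun p => p.1 == q) := by
  induction d with
  | nil => rfl
  | cons p t ih =>
    by_cases hm : p.1 = m
    · rw [List.eraseP_cons_of_pos (by simp [hm])]
      rw [List.find?_cons_of_neg (by simp [hm, hq.symm])]
    · rw [List.eraseP_cons_of_neg (by simp [hm])]
      by_cases hpq : p.1 = q
      · rw [List.find?_cons_of_pos (by simp [hpq]), List.find?_cons_of_pos (by simp [hpq])]
      · rw [List.find?_cons_of_neg (by simp [hpq]), List.find?_cons_of_neg (by simp [hpq]), ih]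

theorem keys_eraseP (d : List (Int × List String)) (m : Int) :
    (d.eraseP (fun p => p.1 == m)).map (fun p => p.1) = (d.map (fun p => p.1)).erase m := by
  induction d with
  | nil => rfl
  | cons p t ih =>
    by_cases hm : p.1 = m
    · rw [List.eraseP_cons_of_pos (by simp [hm])]
      simp [hm]
    · rw [List.eraseP_cons_of_neg (by simp [hm])]
      simp [ih, (by simpa using hm : ¬ (p.1 == m) = true)]

-- the descending sort of a nodup key list is max :: descending sort of the rest
theorem sorted_desc_cons_max (keys : List Int) (m : Int) (hnd : keys.Nodup)
    (hmax : PySem.List.max? keys (fun x => x) = some m) :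
    PySem.List.sorted keys (fun x => x) true = m :: PySem.List.sorted (keys.erase m) (fun x => x) true := by
  have hm : m ∈ keys := PySem.List.max?_mem hmax
  have hperm : (m :: PySem.List.sorted (keys.erase m) (fun x => x) true).Perm keys := by
    refine List.Perm.trans (List.Perm.cons m (PySem.List.sorted_perm _ _ _)) ?_
    exact (List.perm_cons_erase hm).symm
  refine PySem.List.sorted_rev_eq_of_perm_of_pairwise_gt _ _ _ hperm ?_
  have htail_mem : ∀ y ∈ PySem.List.sorted (keys.erase m) (fun x => x) true, y ∈ keys.erase m := by
    intro y hy; exact (PySem.List.mem_sorted _ _ _ _).mp hy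
  constructor
  · intro y hy
    have hy' := htail_mem y hy
    have hle : y ≤ m := PySem.List.max?_isMax hmax y (List.mem_of_mem_erase hy')
    have hne : y ≠ m := by
      intro h; exact (hnd.not_mem_erase (by simpa [h] using hy'))
    exact lt_of_le_of_ne hle hne
  · have hnd' : (PySem.List.sorted (keys.erase m) (fun x => x) true).Nodup :=
      (PySem.List.sorted_perm _ _ _).nodup_iff.mpr (hnd.erase m)
    have hge := PySem.List.sorted_pairwise_rev (keys.erase m) (fun x => x)
    exact (hnd'.and hge).imp (fun {a b} h => lt_of_le_of_ne h.2 (Ne.symm h.1))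

-- scanning the same key list over two dicts that agree on those keys gives the same result
theorem scanQuals_congr (d d' : List (Int × List String)) (u : List (String × String)) (qs : List Int)
    (h : ∀ q ∈ qs, d.find? (fun p => p.1 == q) = d'.find? (fun p => p.1 == q)) :
    scanQualsB d u qs = scanQualsB d' u qs := by
  induction qs with
  | nil => rfl
  | cons q t ih =>
    simp only [scanQualsB, h q (List.mem_cons_self ..)]
    cases findUrlB u (((d'.find? (fun p => p.1 == q)).map (fun p => p.2)).getD []) with
    | some r => rfl
    | none => exact ih (fun q hq => h q (List.mem_cons_of_mem _ hq))

theorem main_eq (u : List (String × String)) :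
    ∀ n (d : List (Int × List String)), d.length ≤ n → (d.map (fun p => p.1)).Nodup →
      check_if_quality_py d u = check_if_quality_py_alt d u := by
  intro n
  induction n with
  | zero =>
    intro d hlen _
    have hnil : d = [] := List.eq_nil_of_length_eq_zero (Nat.le_zero.mp hlen)
    subst hnil
    rw [check_if_quality_py]
    simp [check_if_quality_py_alt, scanQualsB, PySem.List.sorted]
  | succ n ih =>
    intro d hlen hnd
    by_cases hnil : d = []
    · subst hnil
      rw [check_if_quality_py]
      simp [check_if_quality_py_alt, scanQualsB, PySem.List.sorted]
    · have hkeys : d.map (fun p => p.1) ≠ [] := by simpa using hnil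
      rw [check_if_quality_py]
      simp only [if_neg hnil]
      split
      · next heq => exact absurd ((PySem.List.max?_eq_none_iff _ _).mp heq) hkeys
      · next m heq =>
        rw [check_if_quality_py_alt, sorted_desc_cons_max _ m hnd heq, scanQualsB, ← findUrl_eq]
        cases hfind : findUrlA u (((d.find? (fun p => p.1 == m)).map (fun p => p.2)).getD []) with
        | some r => rfl
        | none =>
          have hlt := eraseP_max_lt d m heq
          have hnd' : ((d.eraseP (fun p => p.1 == m)).map (fun p => p.1)).Nodup := by
            rw [keys_eraseP]; exact hnd.erase m
          rw [ih (d.eraseP (fun p => p.1 == m)) (by omega) hnd']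
          rw [check_if_quality_py_alt, keys_eraseP]
          refine scanQuals_congr _ d u _ ?_
          intro q hq
          have hq' : q ∈ (d.map (fun p => p.1)).erase m := (PySem.List.mem_sorted _ _ _ _).mp hq
          have hqm : q ≠ m := fun h => hnd.not_mem_erase (by simpa [h] using hq')
          exact find?_eraseP_ne d m q hqm

-- ===== VERDICT (by name: the statement is the Claim_ definition above) =====
theorem check_if_quality_py_spec : Claim_equal_check_if_quality_py := by
  intro d u _ hpre
  unfold Spec_check_if_quality_py
  exact main_eq u d.length d (le_refl _) hpre.1
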